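-- pv_equiv track=rewrite | github.com/nawang87/Algorithms | Miscellaneous/is_3dArray_size.py | is_3d_array_size
-- ===== SOURCE A (Python) =====
-- def is_3d_array_size(a_size):
--     if a_size<8:
--         return False
--     factors =[]
--     div = 2
--     inp = a_size
--     while len(factors)<3:
--         if a_size%div==0:
--             factors.append(2)
--             a_size= a_size//div
--         else:
--             div+=1
--         if div >=inp:
--             break
--     if len(factors) >= 3:
--         # print True, factors
--         return True
--
--     return False
-- ===== SOURCE B (Python) =====
-- def is_3d_array_size(a_size):
--     # Trial division only up to sqrt(n), counting prime-factor multiplicity, stop at 3.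
--     if a_size < 8:
--         return False
--     n, d, count = a_size, 2, 0
--     while count < 3 and d * d <= n:
--         if n % d == 0:
--             n //= d
--             count += 1
--         else:
--             d += 1
--     # if count < 3 and n > 1, the remaining n is prime (no divisor <= sqrt(n))
--     return count >= 3 or (count == 2 and n > 1)
-- ===== Notes on version B (the rewrite author's own statement) =====
-- stated objective: faster
-- what changed: A scans divisors all the way up to the input itself (linear in the input for primes and semiprimes); B does trial division only up to the square root, counting prime-factor multiplicity and stopping once three factors are found, inferring a final prime factor from a nontrivial leftover cofactor.
import Mathlib
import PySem

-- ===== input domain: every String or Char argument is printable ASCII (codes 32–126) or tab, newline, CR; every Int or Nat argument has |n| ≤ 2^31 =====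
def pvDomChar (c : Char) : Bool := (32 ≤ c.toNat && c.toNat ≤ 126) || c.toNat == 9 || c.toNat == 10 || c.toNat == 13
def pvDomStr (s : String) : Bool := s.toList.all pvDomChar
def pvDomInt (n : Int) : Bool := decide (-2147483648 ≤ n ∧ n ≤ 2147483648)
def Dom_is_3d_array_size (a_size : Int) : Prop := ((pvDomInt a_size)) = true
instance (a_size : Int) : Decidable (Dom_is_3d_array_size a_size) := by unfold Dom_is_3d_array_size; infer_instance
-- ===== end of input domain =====

-- B replaces A's trial division with divisor scanned up to the input itself by trial division
-- only up to sqrt(n), counting prime-factor multiplicity and stopping at 3; same return value.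

-- ===== PORT A =====
-- A's while-loop: state (a, div, c) where c = len(factors) (only the length of `factors` is
-- ever used, every appended element is the literal 2). The fuel argument only makes the
-- recursion total; 2*inp+1 steps always suffice (proved below, the result is fuel-independent
-- beyond that). After the `a_size < 8` guard all values are positive, so Nat % and / match
-- Python's % and // exactly.
def loopA : Nat → Nat → Nat → Nat → Nat → Nat
  | 0, _, _, _, c => c
  | fuel+1, inp, a, d, c =>
    if c < 3 then
      if a % d = 0 then
        -- factors.append; a_size //= div; then the `if div >= inp: break` check
        if inp ≤ d then c + 1 else loopA fuel inp (a / d) d (c + 1)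
      else
        -- div += 1; then the `if div >= inp: break` check
        if inp ≤ d + 1 then c else loopA fuel inp a (d + 1) c
    else c

def is_3d_array_size (a_size : Int) : Bool :=
  if a_size < 8 then false
  else decide (3 ≤ loopA (2 * a_size.toNat + 1) a_size.toNat a_size.toNat 2 0)

-- ===== PORT B =====
-- B's while-loop: state (n, d, count); returns the final (n, count). Fuel as above.
def loopB : Nat → Nat → Nat → Nat → (Nat × Nat)
  | 0, n, _, c => (n, c)
  | fuel+1, n, d, c =>
    if c < 3 ∧ d * d ≤ n then
      if n % d = 0 then loopB fuel (n / d) d (c + 1)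
      else loopB fuel n (d + 1) c
    else (n, c)

def is_3d_array_size_alt (a_size : Int) : Bool :=
  if a_size < 8 then false
  else
    decide (3 ≤ (loopB (2 * a_size.toNat + 1) a_size.toNat 2 0).2)
      || ((loopB (2 * a_size.toNat + 1) a_size.toNat 2 0).2 == 2
          && decide (1 < (loopB (2 * a_size.toNat + 1) a_size.toNat 2 0).1))

-- ===== PRECONDITION & SPEC =====
def Spec_is_3d_array_size (a_size : Int) (out : Bool) : Prop := out = is_3d_array_size_alt a_size
instance (a_size : Int) (out : Bool) : Decidable (Spec_is_3d_array_size a_size out) := by unfold Spec_is_3d_array_size; infer_instance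

-- ===== CLAIM (what is proved, stated in full; the proofs are below) =====
def Claim_equal_is_3d_array_size : Prop := ∀ (a_size : Int), Dom_is_3d_array_size a_size → Spec_is_3d_array_size a_size (is_3d_array_size a_size)

-- ===== LEMMAS AND PROOFS =====

-- Ω with multiplicity: the common yardstick both loops are measured against.
def Omega (n : Nat) : Nat :=
  if h : 2 ≤ n then 1 + Omega (n / n.minFac) else 0
  decreasing_by exact Nat.div_lt_self (by omega) (Nat.minFac_prime (by omega)).one_lt

theorem Omega_lt_two (n : Nat) (h : n < 2) : Omega n = 0 := by
  rw [Omega, dif_neg (by omega)]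

theorem Omega_eq_one_of_prime (n : Nat) (h : n.Prime) : Omega n = 1 := by
  rw [Omega, dif_pos h.two_le, h.minFac_eq, Nat.div_self h.pos, Omega_lt_two 1 (by omega)]

-- If d ≥ 2 divides n and nothing in [2,d) does, then d is n's least prime factor.
theorem minFac_eq_of_first (n d : Nat) (h2 : 2 ≤ d) (hd : d ∣ n) (hn : 1 ≤ n)
    (hfirst : ∀ k, 2 ≤ k → k < d → ¬ k ∣ n) : n.minFac = d := by
  have hdn : d ≤ n := Nat.le_of_dvd (by omega) hd
  have hled : n.minFac ≤ d := Nat.minFac_le_of_dvd h2 hd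
  have hp : (n.minFac).Prime := Nat.minFac_prime (by omega)
  rcases Nat.lt_or_ge n.minFac d with hlt | hge
  · exact absurd (Nat.minFac_dvd n) (hfirst _ hp.two_le hlt)
  · omega

theorem Omega_step (n d : Nat) (h2 : 2 ≤ d) (hd : d ∣ n) (hn : 1 ≤ n)
    (hfirst : ∀ k, 2 ≤ k → k < d → ¬ k ∣ n) : Omega n = 1 + Omega (n / d) := by
  have hdn : d ≤ n := Nat.le_of_dvd (by omega) hd
  rw [Omega, dif_pos (by omega), minFac_eq_of_first n d h2 hd hn hfirst]

-- No divisor k with k*k ≤ n means n is prime (for n ≥ 2).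
theorem prime_of_no_small_divisor (n : Nat) (h2 : 2 ≤ n)
    (h : ∀ k, 2 ≤ k → k * k ≤ n → ¬ k ∣ n) : n.Prime := by
  rw [Nat.prime_def_le_sqrt]
  refine ⟨h2, fun m hm hms => h m hm ?_⟩
  calc m * m ≤ Nat.sqrt n * Nat.sqrt n := Nat.mul_le_mul hms hms
    _ ≤ n := Nat.sqrt_le n

-- === A's loop: result ≥ 3  ↔  c + Ω(a) ≥ 3 (under the loop invariants) ===
theorem loopA_correct (fuel inp a d c : Nat)
    (ha : 1 ≤ a) (hd2 : 2 ≤ d) (hdi : d ≤ inp) (hai : a ≤ inp)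
    (htop : a = inp → c = 0)
    (hfirst : ∀ k, 2 ≤ k → k < d → ¬ k ∣ a)
    (hfuel : a + (inp - d) + 1 ≤ fuel) :
    (3 ≤ loopA fuel inp a d c ↔ 3 ≤ c + Omega a) := by
  induction fuel generalizing a d c with
  | zero => omega
  | succ fuel ih =>
    rw [loopA]
    by_cases hc : c < 3
    · rw [if_pos hc]
      by_cases hdvd : a % d = 0
      · have hdvd' : d ∣ a := Nat.dvd_of_mod_eq_zero hdvd
        have hda : d ≤ a := Nat.le_of_dvd (by omega) hdvd'
        have hstep : Omega a = 1 + Omega (a / d) := Omega_step a d hd2 hdvd' ha hfirst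
        have ha' : 1 ≤ a / d := (Nat.one_le_div_iff (by omega)).mpr hda
        have haa : a / d < a := Nat.div_lt_self (by omega) (by omega)
        rw [if_pos hdvd]
        by_cases hbrk : inp ≤ d
        · -- break right after the division: d ≥ inp forces a = d = inp, quotient 1, c = 0
          have had : a = d := by omega
          have hc0 : c = 0 := htop (by omega)
          have h1 : Omega a = 1 := by
            rw [hstep, had, Nat.div_self (by omega), Omega_lt_two 1 (by omega)]
          rw [if_pos hbrk, h1]
        · rw [if_neg hbrk,
              ih (a / d) d (c + 1) ha' hd2 hdi (by omega) (by omega)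
                (fun k hk hkd hkdvd => hfirst k hk hkd (hkdvd.trans (Nat.div_dvd_of_dvd hdvd')))
                (by omega)]
          omega
      · have hndvd : ¬ d ∣ a := fun h => hdvd (Nat.mod_eq_zero_of_dvd h)
        have hfirst' : ∀ k, 2 ≤ k → k < d + 1 → ¬ k ∣ a := by
          intro k hk hkd
          rcases Nat.lt_or_ge k d with h | h
          · exact hfirst k hk h
          · have hkd' : k = d := by omega
            subst hkd'; exact hndvd
        rw [if_neg hdvd]
        by_cases hbrk : inp ≤ d + 1
        · -- break without a division: a is 1, or a is prime and a = inp (so c = 0)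
          rw [if_pos hbrk]
          rcases Nat.lt_or_ge a 2 with h1 | h1
          · rw [Omega_lt_two a h1]; omega
          · have haeq : a = inp := by
              by_contra hne
              exact hfirst' a h1 (by omega) dvd_rfl
            have hc0 : c = 0 := htop haeq
            have hap : a.Prime := by
              rw [Nat.prime_def_lt]
              refine ⟨h1, fun m hm hmd => ?_⟩
              by_contra hm1
              have hm0 : m ≠ 0 := by rintro rfl; rw [zero_dvd_iff] at hmd; omega
              exact hfirst' m (by omega) (by omega) hmd
            rw [Omega_eq_one_of_prime a hap]
            omega
        · rw [if_neg hbrk, ih a (d + 1) c ha (by omega) (by omega) hai htop hfirst' (by omega)]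
    · rw [if_neg hc]
      omega

-- === B's loop: (c' ≥ 3 ∨ (c' = 2 ∧ n' > 1))  ↔  c + Ω(n) ≥ 3 (under the loop invariants) ===
theorem loopB_correct (fuel n d c : Nat)
    (hn : 1 ≤ n) (hd2 : 2 ≤ d)
    (hfirst : ∀ k, 2 ≤ k → k < d → ¬ k ∣ n)
    (hfuel : n + (n - d) + 1 ≤ fuel) :
    (3 ≤ (loopB fuel n d c).2 ∨ ((loopB fuel n d c).2 = 2 ∧ 1 < (loopB fuel n d c).1))
      ↔ 3 ≤ c + Omega n := by
  induction fuel generalizing n d c with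
  | zero => omega
  | succ fuel ih =>
    rw [loopB]
    by_cases hg : c < 3 ∧ d * d ≤ n
    · rw [if_pos hg]
      by_cases hdvd : n % d = 0
      · have hdvd' : d ∣ n := Nat.dvd_of_mod_eq_zero hdvd
        have hdn : d ≤ n := Nat.le_of_dvd (by omega) hdvd'
        have hstep : Omega n = 1 + Omega (n / d) := Omega_step n d hd2 hdvd' hn hfirst
        have hn' : 1 ≤ n / d := (Nat.one_le_div_iff (by omega)).mpr hdn
        have hnn : n / d < n := Nat.div_lt_self (by omega) (by omega)
        rw [if_pos hdvd,
            ih (n / d) d (c + 1) hn' hd2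
              (fun k hk hkd hkdvd => hfirst k hk hkd (hkdvd.trans (Nat.div_dvd_of_dvd hdvd')))
              (by omega)]
        omega
      · have hndvd : ¬ d ∣ n := fun h => hdvd (Nat.mod_eq_zero_of_dvd h)
        have hd2d : d * 2 ≤ d * d := Nat.mul_le_mul_left d hd2
        have hdltn : d < n := by omega
        rw [if_neg hdvd,
            ih n (d + 1) c hn (by omega)
              (by
                intro k hk hkd
                rcases Nat.lt_or_ge k d with h | h
                · exact hfirst k hk h
                · have hkd' : k = d := by omega
                  subst hkd'; exact hndvd)
              (by omega)]
    · rw [if_neg hg]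
      rcases Decidable.not_and_iff_or_not.mp hg with hc | hsq
      · -- count ≥ 3 already
        constructor <;> intro <;> omega
      · -- d*d > n: the remaining n is 1 or prime
        rcases Nat.lt_or_ge n 2 with h1 | h1
        · rw [Omega_lt_two n h1]
          constructor
          · rintro (h | ⟨h, h'⟩) <;> omega
          · intro h; omega
        · have hp : n.Prime := prime_of_no_small_divisor n h1 (by
            intro k hk hkk
            have hklt : k < d := by
              by_contra hge
              have := Nat.mul_le_mul (Nat.not_lt.mp hge) (Nat.not_lt.mp hge)
              omega
            exact hfirst k hk hklt)
          rw [Omega_eq_one_of_prime n hp]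
          constructor
          · rintro (h | ⟨h, h'⟩) <;> omega
          · intro h
            rcases Nat.lt_or_ge c 2 with h3 | h3
            · omega
            · rcases Nat.lt_or_ge c 3 with h4 | h4
              · right; exact ⟨by omega, by omega⟩
              · left; omega

-- B's final boolean expression, as the proposition it decides.
theorem boolB_eq (c n' : Nat) :
    (decide (3 ≤ c) || (c == 2 && decide (1 < n'))) = decide (3 ≤ c ∨ (c = 2 ∧ 1 < n')) := by
  by_cases h1 : 3 ≤ c <;> by_cases h2 : c = 2 <;> by_cases h3 : 1 < n' <;>
    simp [h1, h2, h3]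

-- ===== VERDICT (by name: the statement is the Claim_ definition above) =====
theorem is_3d_array_size_spec : Claim_equal_is_3d_array_size := by
  intro a_size _
  unfold Spec_is_3d_array_size is_3d_array_size is_3d_array_size_alt
  by_cases h8 : a_size < 8
  · rw [if_pos h8, if_pos h8]
  · rw [if_neg h8, if_neg h8]
    have hn8 : 8 ≤ a_size.toNat := by omega
    have hA := loopA_correct (2 * a_size.toNat + 1) a_size.toNat a_size.toNat 2 0
      (by omega) (by omega) (by omega) le_rfl (fun _ => rfl)
      (by intro k hk hkd; omega) (by omega)
    have hB := loopB_correct (2 * a_size.toNat + 1) a_size.toNat 2 0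
      (by omega) (by omega) (by intro k hk hkd; omega) (by omega)
    rw [boolB_eq, decide_eq_decide]
    exact hA.trans hB.symm
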